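-- pv_equiv track=rewrite | github.com/Franky-X/Hill_Climb | STS.py | is_valid_sts
-- ===== SOURCE A (Python) =====
-- def is_valid_sts(triples, n):
--     # Check if there are any duplicate triples
--     unique_triples = [tuple(sorted(triple)) for triple in triples]
--     if len(unique_triples) != len(set(unique_triples)):
--         return False
--
--     # Check if each pair appears exactly once in the triples
--     pair_count = {}
--     for triple in unique_triples:
--         for i in range(3):
--             for j in range(i + 1, 3):
--                 pair = (min(triple[i], triple[j]), max(triple[i], triple[j]))
--                 if pair not in pair_count:
--                     pair_count[pair] = 0
--                 pair_count[pair] += 1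
--
--     # Verify that every pair appears exactly once
--     for count in pair_count.values():
--         if count != 1:
--             return False
--
--     # Check if the number of unique pairs matches the expected number
--     expected_pairs = n * (n - 1) // 2
--     if len(pair_count) != expected_pairs:
--         return False
--
--     return True
-- ===== SOURCE B (Python) =====
-- def is_valid_sts(triples, n):
--     # Sort-then-scan: collect all 3 pairs of every sorted triple, sort the flat
--     # pair list, and look for an adjacent duplicate; a valid system then has
--     # exactly 3*len(triples) pairs, which must equal n*(n-1)//2.
--     pairs = []
--     for triple in triples:
--         t = sorted(triple)
--         pairs.extend(((t[0], t[1]), (t[0], t[2]), (t[1], t[2])))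
--     sp = sorted(pairs)
--     for p, q in zip(sp, sp[1:]):
--         if p == q:
--             return False
--     return 3 * len(triples) == n * (n - 1) // 2
-- ===== Notes on version B (the rewrite author's own statement) =====
-- stated objective: alternative
-- what changed: B replaces A's hash-counting pipeline (duplicate-triple set check, a pair-count dict built with nested index loops, a count-verification pass, then a dict-size comparison) by sort-then-scan: it flattens all pairs into one list, sorts it lexicographically, rejects on any adjacent duplicate, and finally compares 3*len(triples) with n*(n-1)//2 (valid iff every pair is distinct and the pair total matches, which makes A's set/dict machinery unnecessary).
-- outside the precondition, e.g. on is_valid_sts([[1], [1]], 0): A returns False, B raises IndexError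
import Mathlib
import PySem

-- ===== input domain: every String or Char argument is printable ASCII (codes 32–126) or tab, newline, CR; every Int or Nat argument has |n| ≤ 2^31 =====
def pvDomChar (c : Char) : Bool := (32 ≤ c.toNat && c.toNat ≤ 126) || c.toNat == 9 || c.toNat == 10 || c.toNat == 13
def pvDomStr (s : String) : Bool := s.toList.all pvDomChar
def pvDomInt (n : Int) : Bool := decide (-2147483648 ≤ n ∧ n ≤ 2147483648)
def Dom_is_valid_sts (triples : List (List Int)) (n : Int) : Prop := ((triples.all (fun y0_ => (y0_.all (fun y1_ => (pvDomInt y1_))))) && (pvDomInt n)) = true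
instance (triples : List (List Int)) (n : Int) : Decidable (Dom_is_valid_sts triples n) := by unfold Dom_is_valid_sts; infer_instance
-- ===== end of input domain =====

-- B replaces A's hash-counting pipeline (set/dict of pair counts, three passes) by
-- sort-then-scan: flatten all pairs, sort lexicographically, reject on an adjacent
-- duplicate, then compare 3*len(triples) with n*(n-1)//2: objective 'alternative'.

-- ===== PORT A =====
def is_valid_sts (triples : List (List Int)) (n : Int) : Bool :=
  let unique_triples := triples.map (fun triple => PySem.List.sorted triple (fun x => x))
  if ((unique_triples.length : Int) ≠ ((PySem.Set.ofList unique_triples).length : Int)) then false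
  else
    let pair_count : PySem.Dict (Int × Int) Int :=
      unique_triples.foldl (fun pc triple =>
        (PySem.List.pyRange 0 3).foldl (fun pc i =>
          (PySem.List.pyRange (i + 1) 3).foldl (fun pc j =>
            let x := (PySem.List.pyGet? triple i).getD 0
            let y := (PySem.List.pyGet? triple j).getD 0
            let pair := (min x y, max x y)
            let pc := if pc.contains pair = false then pc.insert pair 0 else pc
            pc.modify pair 0 (· + 1)) pc) pc) PySem.Dict.empty
    if pair_count.values.any (fun count => count ≠ 1) then false
    else
      let expected_pairs := PySem.Int.floordiv (n * (n - 1)) 2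
      if ((pair_count.size : Int) ≠ expected_pairs) then false
      else true

-- ===== PORT B =====
def is_valid_sts_alt (triples : List (List Int)) (n : Int) : Bool :=
  let pairs := triples.foldl (fun acc triple =>
    let t := PySem.List.sorted triple (fun x => x)
    let a := (PySem.List.pyGet? t 0).getD 0
    let b := (PySem.List.pyGet? t 1).getD 0
    let c := (PySem.List.pyGet? t 2).getD 0
    acc ++ [(a, b), (a, c), (b, c)]) []
  let sp := PySem.List.sorted2 pairs (fun p => p.1) (fun p => p.2)
  if (sp.zip (PySem.List.slice sp (some 1) none)).any (fun pq => pq.1 == pq.2) then false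
  else decide ((3 * (triples.length : Int)) = PySem.Int.floordiv (n * (n - 1)) 2)

-- ===== PRECONDITION & SPEC =====
-- Pre_ excludes inputs containing a triple with fewer than 3 elements: on those A raises
-- IndexError unless its duplicate-triple check happens to return False first, and B's natural
-- single flattening pass raises IndexError there.
def Pre_is_valid_sts (triples : List (List Int)) (n : Int) : Prop :=
  ∀ t ∈ triples, 3 ≤ t.length
instance (triples : List (List Int)) (n : Int) : Decidable (Pre_is_valid_sts triples n) := by
  unfold Pre_is_valid_sts; infer_instance

def pvWitness_is_valid_sts : List (List Int) × Int := ([[1, 2, 3]], 3)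

def Spec_is_valid_sts (triples : List (List Int)) (n : Int) (out : Bool) : Prop := out = is_valid_sts_alt triples n
instance (triples : List (List Int)) (n : Int) (out : Bool) : Decidable (Spec_is_valid_sts triples n out) := by unfold Spec_is_valid_sts; infer_instance

-- ===== CLAIM (what is proved, stated in full; the proofs are below) =====
def Claim_equal_is_valid_sts : Prop := ∀ (triples : List (List Int)) (n : Int), Dom_is_valid_sts triples n → Pre_is_valid_sts triples n → Spec_is_valid_sts triples n (is_valid_sts triples n)

-- ===== LEMMAS AND PROOFS =====

-- the three pairs both programs form from a sorted triple, in order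
def pvPairs (t : List Int) : List (Int × Int) :=
  [((PySem.List.pyGet? t 0).getD 0, (PySem.List.pyGet? t 1).getD 0),
   ((PySem.List.pyGet? t 0).getD 0, (PySem.List.pyGet? t 2).getD 0),
   ((PySem.List.pyGet? t 1).getD 0, (PySem.List.pyGet? t 2).getD 0)]

-- A's per-pair dict update
def pvStepA (pc : PySem.Dict (Int × Int) Int) (pair : Int × Int) : PySem.Dict (Int × Int) Int :=
  let pc := if pc.contains pair = false then pc.insert pair 0 else pc
  pc.modify pair 0 (· + 1)

-- A's pairs, with the min/max still in place
def pvPairsA (t : List Int) : List (Int × Int) :=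
  [(min ((PySem.List.pyGet? t 0).getD 0) ((PySem.List.pyGet? t 1).getD 0),
    max ((PySem.List.pyGet? t 0).getD 0) ((PySem.List.pyGet? t 1).getD 0)),
   (min ((PySem.List.pyGet? t 0).getD 0) ((PySem.List.pyGet? t 2).getD 0),
    max ((PySem.List.pyGet? t 0).getD 0) ((PySem.List.pyGet? t 2).getD 0)),
   (min ((PySem.List.pyGet? t 1).getD 0) ((PySem.List.pyGet? t 2).getD 0),
    max ((PySem.List.pyGet? t 1).getD 0) ((PySem.List.pyGet? t 2).getD 0))]

-- lexicographic "≤" on the sorted pair list (what Python's tuple sort guarantees)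
def pvR (p q : Int × Int) : Prop := p.1 < q.1 ∨ (p.1 = q.1 ∧ p.2 ≤ q.2)

theorem pv_insert_insert (d : PySem.Dict (Int × Int) Int) (p : Int × Int)
    (h : d.contains p = false) : (d.insert p 0).insert p 1 = d.insert p 1 := by
  have h' : ∀ q ∈ d.items, (q.1 == p) = false := by
    intro q hq
    by_contra hc
    have : d.contains p = true := by
      simp only [PySem.Dict.contains, List.any_eq_true]
      exact ⟨q, hq, by simpa using hc⟩
    simp [this] at h
  have hinner : d.insert p 0 = ⟨d.items ++ [(p, 0)]⟩ := by
    unfold PySem.Dict.insert; rw [if_neg (by simp [h])]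
  have houter : d.insert p 1 = ⟨d.items ++ [(p, 1)]⟩ := by
    unfold PySem.Dict.insert; rw [if_neg (by simp [h])]
  rw [hinner, houter]
  unfold PySem.Dict.insert
  rw [if_pos (by simp [PySem.Dict.contains])]
  congr 1
  simp only [List.map_append]
  rw [List.map_congr_left (g := id) (fun q hq => by
    have := h' q hq; simp [this])]
  simp

theorem pv_stepA_eq (pc : PySem.Dict (Int × Int) Int) (p : Int × Int) :
    pvStepA pc p = pc.modify p 0 (· + 1) := by
  unfold pvStepA
  cases hc : pc.contains p
  · simp only [if_true]
    unfold PySem.Dict.modify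
    rw [PySem.Dict.getD_insert_self]
    have hget : pc.getD p 0 = 0 := by
      have : pc.get? p = none := (PySem.Dict.get?_eq_none_iff_contains pc p).2 hc
      simp [PySem.Dict.getD, this]
    rw [hget]
    exact pv_insert_insert pc p hc
  · simp

theorem pv_innerA_eq (pc : PySem.Dict (Int × Int) Int) (t : List Int) :
    (PySem.List.pyRange 0 3).foldl (fun pc i =>
      (PySem.List.pyRange (i + 1) 3).foldl (fun pc j =>
        let x := (PySem.List.pyGet? t i).getD 0
        let y := (PySem.List.pyGet? t j).getD 0
        let pair := (min x y, max x y)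
        let pc := if pc.contains pair = false then pc.insert pair 0 else pc
        pc.modify pair 0 (· + 1)) pc) pc
    = (pvPairsA t).foldl pvStepA pc := by
  have h1 : PySem.List.pyRange 0 3 = [0, 1, 2] := by decide
  have h2 : PySem.List.pyRange (0 + 1) 3 = [1, 2] := by decide
  have h3 : PySem.List.pyRange (1 + 1) 3 = [2] := by decide
  have h4 : PySem.List.pyRange (2 + 1) 3 = [] := by decide
  simp only [h1, List.foldl_cons, List.foldl_nil, h2, h3, h4, pvPairsA, pvStepA]

theorem pv_pairsA_sorted (t : List Int) (h : 3 ≤ t.length) :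
    pvPairsA (PySem.List.sorted t (fun x => x)) = pvPairs (PySem.List.sorted t (fun x => x)) := by
  set s := PySem.List.sorted t (fun x => x) with hs
  have hlen : s.length = t.length := PySem.List.length_sorted t _ _
  have h0 : (0 : ℕ) < s.length := by omega
  have h1 : (1 : ℕ) < s.length := by omega
  have h2 : (2 : ℕ) < s.length := by omega
  have g0 : PySem.List.pyGet? s (0 : Int) = some s[0] := by
    rw [show (0 : Int) = ((0 : ℕ) : Int) by norm_num, PySem.List.pyGet?_natCast]
    simp [h0]
  have g1 : PySem.List.pyGet? s (1 : Int) = some s[1] := by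
    rw [show (1 : Int) = ((1 : ℕ) : Int) by norm_num, PySem.List.pyGet?_natCast]
    simp [h1]
  have g2 : PySem.List.pyGet? s (2 : Int) = some s[2] := by
    rw [show (2 : Int) = ((2 : ℕ) : Int) by norm_num, PySem.List.pyGet?_natCast]
    simp [h2]
  have m01 : s[0] ≤ s[1] := PySem.List.sorted_id_getElem_mono t (by norm_num) h1
  have m02 : s[0] ≤ s[2] := PySem.List.sorted_id_getElem_mono t (by norm_num) h2
  have m12 : s[1] ≤ s[2] := PySem.List.sorted_id_getElem_mono t (by norm_num) h2
  simp only [pvPairsA, pvPairs, g0, g1, g2, Option.getD_some]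
  rw [min_eq_left m01, max_eq_right m01, min_eq_left m02, max_eq_right m02,
    min_eq_left m12, max_eq_right m12]

theorem pv_nodup_flatMap (L : List (List Int)) :
    (L.flatMap pvPairs).Nodup → L.Nodup := by
  induction L with
  | nil => intro _; exact List.nodup_nil
  | cons t l ih =>
    intro h
    rw [List.flatMap_cons, List.nodup_append] at h
    obtain ⟨h1, h2, hdisj⟩ := h
    refine List.Nodup.cons ?_ (ih h2)
    intro htl
    have hmem1 : ((PySem.List.pyGet? t 0).getD 0, (PySem.List.pyGet? t 1).getD 0) ∈ pvPairs t := by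
      simp [pvPairs]
    have hmem2 : ((PySem.List.pyGet? t 0).getD 0, (PySem.List.pyGet? t 1).getD 0) ∈ l.flatMap pvPairs :=
      List.mem_flatMap.2 ⟨t, htl, by simp [pvPairs]⟩
    exact hdisj _ hmem1 _ hmem2 rfl

theorem pv_A_char (triples : List (List Int)) (n : Int)
    (hpre : ∀ t ∈ triples, 3 ≤ t.length) :
    is_valid_sts triples n
      = (if ¬ (((triples.map (fun triple => PySem.List.sorted triple (fun x => x))).length : Int)
            = ((PySem.Set.ofList (triples.map (fun triple => PySem.List.sorted triple (fun x => x)))).length : Int)) then false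
         else
           if (PySem.Dict.counter ((triples.map (fun triple => PySem.List.sorted triple (fun x => x))).flatMap pvPairs)).values.any (fun count => count ≠ 1) then false
           else if (((PySem.Dict.counter ((triples.map (fun triple => PySem.List.sorted triple (fun x => x))).flatMap pvPairs)).size : Int) ≠ PySem.Int.floordiv (n * (n - 1)) 2) then false
           else true) := by
  simp only [is_valid_sts]
  congr 1
  have h1 : ∀ (pc : PySem.Dict (Int × Int) Int) (t : List Int),
      t ∈ triples.map (fun triple => PySem.List.sorted triple (fun x => x)) →
      (PySem.List.pyRange 0 3).foldl (fun pc i =>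
        (PySem.List.pyRange (i + 1) 3).foldl (fun pc j =>
          let x := (PySem.List.pyGet? t i).getD 0
          let y := (PySem.List.pyGet? t j).getD 0
          let pair := (min x y, max x y)
          let pc := if pc.contains pair = false then pc.insert pair 0 else pc
          pc.modify pair 0 (· + 1)) pc) pc
      = (pvPairs t).foldl (fun d p => d.modify p 0 (· + 1)) pc := by
    intro pc t ht
    rw [pv_innerA_eq]
    obtain ⟨u, hu, rfl⟩ := List.mem_map.1 ht
    rw [pv_pairsA_sorted u (hpre u hu)]
    exact PySem.List.foldl_congr_mem _ _ _ _ (fun acc x _ => pv_stepA_eq acc x)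
  rw [PySem.List.foldl_congr_mem _ _ _ _ (fun acc x hx => h1 acc x hx)]
  rw [← List.foldl_flatMap, ← PySem.Dict.counter_eq_foldl]

-- insertBy with a total 'before' preserves Pairwise of the corresponding relation
theorem pv_insertBy_pairwise {α : Type} (R : α → α → Prop) (before : α → α → Bool)
    (htrue : ∀ a b, before a b = true → R a b)
    (hfalse : ∀ a b, before a b = false → R b a)
    (htrans : ∀ a b c, R a b → R b c → R a c)
    (x : α) (ys : List α) (h : ys.Pairwise R) :
    (PySem.List.insertBy before x ys).Pairwise R := by
  induction ys with
  | nil => simpa [PySem.List.insertBy] using List.pairwise_singleton R x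
  | cons y ys ih =>
    rw [List.pairwise_cons] at h
    obtain ⟨hy, hys⟩ := h
    show (if before x y = true then x :: y :: ys else y :: PySem.List.insertBy before x ys).Pairwise R
    split_ifs with hb
    · refine List.Pairwise.cons ?_ (List.Pairwise.cons hy hys)
      intro z hz
      rcases List.mem_cons.1 hz with rfl | hz'
      · exact htrue x z hb
      · exact htrans x y z (htrue x y hb) (hy z hz')
    · refine List.Pairwise.cons ?_ (ih hys)
      intro z hz
      rcases (PySem.List.mem_insertBy before x z ys).1 hz with rfl | hz'
      · exact hfalse z y (by simpa using hb)
      · exact hy z hz'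

theorem pv_sorted2_pairwise (xs : List (Int × Int)) :
    (PySem.List.sorted2 xs (fun p => p.1) (fun p => p.2)).Pairwise pvR := by
  show (xs.foldl (fun acc x => PySem.List.insertBy _ x acc) []).Pairwise pvR
  have main : ∀ (l acc : List (Int × Int)), acc.Pairwise pvR →
      (l.foldl (fun acc x => PySem.List.insertBy
        (fun a b => decide (a.1 < b.1) || !decide (b.1 < a.1) && decide (a.2 < b.2)) x acc) acc).Pairwise pvR := by
    intro l
    induction l with
    | nil => intro acc h; simpa using h
    | cons x xs ih =>
      intro acc h
      simp only [List.foldl_cons]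
      refine ih _ ?_
      refine pv_insertBy_pairwise pvR _ ?_ ?_ ?_ x acc h
      · intro a b hb
        simp only [Bool.or_eq_true, Bool.and_eq_true, Bool.not_eq_eq_eq_not, Bool.not_true,
          decide_eq_true_eq, decide_eq_false_iff_not] at hb
        unfold pvR; omega
      · intro a b hb
        simp only [Bool.or_eq_false_iff, Bool.and_eq_false_iff, Bool.not_eq_eq_eq_not,
          Bool.not_false, decide_eq_true_eq, decide_eq_false_iff_not] at hb
        unfold pvR; omega
      · intro a b c h1 h2; unfold pvR at *; omega
  exact main xs [] List.Pairwise.nil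

-- the adjacent-duplicate scan, read as a Chain'
theorem pv_zip_any_eq_false_iff (l : List (Int × Int)) :
    ((l.zip l.tail).any (fun pq => pq.1 == pq.2) = false) ↔ l.IsChain (· ≠ ·) := by
  induction l with
  | nil => simp
  | cons x xs ih =>
    cases xs with
    | nil => simp
    | cons y ys =>
      simp only [List.tail_cons, List.zip_cons_cons, List.any_cons, Bool.or_eq_false_iff,
        List.isChain_cons_cons] at *
      constructor
      · rintro ⟨h1, h2⟩
        exact ⟨by simpa using h1, ih.1 h2⟩
      · rintro ⟨h1, h2⟩
        exact ⟨by simpa using h1, ih.2 h2⟩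

-- strict lexicographic order on pairs is transitive
theorem pv_strict_trans (a b c : Int × Int) (h1 : pvR a b ∧ a ≠ b) (h2 : pvR b c ∧ b ≠ c) :
    pvR a c ∧ a ≠ c := by
  obtain ⟨a1, a2⟩ := a
  obtain ⟨b1, b2⟩ := b
  obtain ⟨c1, c2⟩ := c
  simp only [pvR, ne_eq, Prod.mk.injEq, not_and] at *
  omega

-- in a lexicographically ordered list, no adjacent duplicate means no duplicate at all
theorem pv_nodup_iff_chain' (l : List (Int × Int)) (hp : l.Pairwise pvR) :
    l.Nodup ↔ l.IsChain (· ≠ ·) := by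
  constructor
  · intro h
    exact List.Pairwise.isChain h
  · intro hch
    have hchR : l.IsChain pvR := List.Pairwise.isChain hp
    have hchS : l.IsChain (fun a b => pvR a b ∧ a ≠ b) := by
      clear hp
      induction l with
      | nil => simp
      | cons x xs ih =>
        cases xs with
        | nil => simp
        | cons y ys =>
          rw [List.isChain_cons_cons] at hch hchR ⊢
          exact ⟨⟨hchR.1, hch.1⟩, ih hch.2 hchR.2⟩
    have hpS : l.Pairwise (fun a b => pvR a b ∧ a ≠ b) :=
      (@List.isChain_iff_pairwise _ (fun a b => pvR a b ∧ a ≠ b) l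
        ⟨fun h1 h2 => pv_strict_trans _ _ _ h1 h2⟩).1 hchS
    exact hpS.imp (fun h => h.2)

theorem pv_length_flatMap_pairs (L : List (List Int)) :
    (L.flatMap pvPairs).length = 3 * L.length := by
  induction L with
  | nil => simp
  | cons t l ih => simp [List.flatMap_cons, pvPairs, ih]; omega

-- ===== VERDICT (by name: the statement is the Claim_ definition above) =====
theorem is_valid_sts_spec : Claim_equal_is_valid_sts := by
  intro triples n _hdom hpre
  unfold Spec_is_valid_sts
  rw [pv_A_char triples n hpre]
  set L := triples.map (fun triple => PySem.List.sorted triple (fun x => x)) with hL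
  set P := L.flatMap pvPairs with hPdef
  unfold is_valid_sts_alt
  have hpairs : triples.foldl (fun acc triple =>
      let t := PySem.List.sorted triple (fun x => x)
      let a := (PySem.List.pyGet? t 0).getD 0
      let b := (PySem.List.pyGet? t 1).getD 0
      let c := (PySem.List.pyGet? t 2).getD 0
      acc ++ [(a, b), (a, c), (b, c)]) [] = P := by
    rw [PySem.List.foldl_append_eq_flatMap]
    rw [hPdef, hL, List.flatMap_map]
    rfl
  rw [hpairs]
  show _ = (if ((PySem.List.sorted2 P (fun p => p.1) (fun p => p.2)).zip
      (PySem.List.slice (PySem.List.sorted2 P (fun p => p.1) (fun p => p.2)) (some 1) none)).any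
        (fun pq => pq.1 == pq.2) then false
    else decide ((3 * (triples.length : Int)) = PySem.Int.floordiv (n * (n - 1)) 2))
  set sp := PySem.List.sorted2 P (fun p => p.1) (fun p => p.2) with hsp
  have hperm : sp.Perm P := PySem.List.sorted2_perm P _ _ _
  have hpw : sp.Pairwise pvR := pv_sorted2_pairwise P
  have htail : PySem.List.slice sp (some 1) none = sp.tail := PySem.List.slice_from_one sp
  rw [htail]
  have hNodup : sp.Nodup ↔ P.Nodup := hperm.nodup_iff
  have hvals : (PySem.Dict.counter P).values = (PySem.Set.ofList P).map (fun k => ((P.count k : Int))) := by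
    simp [PySem.Dict.values, PySem.Dict.items_counter]
  have hsize : (PySem.Dict.counter P).size = (PySem.Set.ofList P).length := by
    simp [PySem.Dict.size, PySem.Dict.items_counter]
  by_cases hND : P.Nodup
  · -- no repeated pair: A's first two checks pass, B's scan finds nothing
    have hLnd : L.Nodup := pv_nodup_flatMap L hND
    have hlen : ((L.length : Int) = ((PySem.Set.ofList L).length : Int)) := by
      rw [PySem.Set.ofList_eq_self_of_nodup _ hLnd]
    rw [if_neg (by simpa using hlen)]
    have hall : ((PySem.Dict.counter P).values.any (fun count => count ≠ 1)) = false := by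
      rw [hvals]
      simp only [List.any_map, List.any_eq_false]
      intro k hk
      rw [PySem.Set.mem_ofList] at hk
      have := List.nodup_iff_count_eq_one.1 hND k hk
      simp [Function.comp, this]
    rw [hall]
    simp only [Bool.false_eq_true, if_false]
    have hscan : ((sp.zip sp.tail).any (fun pq => pq.1 == pq.2)) = false := by
      rw [pv_zip_any_eq_false_iff]
      exact (pv_nodup_iff_chain' sp hpw).1 (hNodup.2 hND)
    rw [hscan]
    simp only [Bool.false_eq_true, if_false]
    have hPlen : (PySem.Set.ofList P).length = P.length := by
      rw [PySem.Set.ofList_eq_self_of_nodup _ hND]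
    have hP3 : (P.length : Int) = 3 * (triples.length : Int) := by
      rw [hPdef, pv_length_flatMap_pairs, hL]
      push_cast [List.length_map]
      ring
    rw [hsize, hPlen]
    by_cases hx : ((3 * (triples.length : Int)) = PySem.Int.floordiv (n * (n - 1)) 2)
    · rw [if_neg (by omega), decide_eq_true hx]
    · rw [if_pos (by omega), Eq.symm (decide_eq_false hx)]
  · -- a repeated pair: both sides are false
    have hscan : ((sp.zip sp.tail).any (fun pq => pq.1 == pq.2)) = true := by
      by_contra hc
      have hf : ((sp.zip sp.tail).any (fun pq => pq.1 == pq.2)) = false := by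
        cases h : ((sp.zip sp.tail).any (fun pq => pq.1 == pq.2)) <;> simp_all
      exact hND (hNodup.1 ((pv_nodup_iff_chain' sp hpw).2 ((pv_zip_any_eq_false_iff sp).1 hf)))
    rw [hscan]
    simp only [if_true]
    have hany : ((PySem.Dict.counter P).values.any (fun count => count ≠ 1)) = true := by
      rw [hvals]
      rw [List.nodup_iff_count_eq_one] at hND
      push_neg at hND
      obtain ⟨k, hk, hkc⟩ := hND
      simp only [List.any_map, List.any_eq_true]
      refine ⟨k, (PySem.Set.mem_ofList P k).2 hk, ?_⟩
      simp only [Function.comp]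
      simpa using (by exact_mod_cast hkc : ((P.count k : Int)) ≠ 1)
    by_cases hlen : ((L.length : Int) = ((PySem.Set.ofList L).length : Int))
    · rw [if_neg (by simpa using hlen), hany]
      simp
    · rw [if_pos (by simpa using hlen)]
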